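-- pv_equiv track=rewrite | github.com/mtesseract/plots | WeierstrassElliptic/wp-plots.py | takeUntil
-- ===== SOURCE A (Python) =====
-- def takeUntil(l,x):
--     lRes = []
--     while l != []:
--         lRes.append(l[0])
--         if l[0] == x:
--             break
--         else:
--             l = l[1:]
--     return lRes
-- ===== SOURCE B (Python) =====
-- def takeUntil(l, x):
--     if x in l:
--         return l[:l.index(x) + 1]
--     return l[:]
-- ===== Notes on version B (the rewrite author's own statement) =====
-- stated objective: faster
-- what changed: Replaces the append-one-element-per-iteration while loop (which re-slices the remaining list each step) with a single membership/index test followed by one slice producing the whole prefix at once.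
import Mathlib
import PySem

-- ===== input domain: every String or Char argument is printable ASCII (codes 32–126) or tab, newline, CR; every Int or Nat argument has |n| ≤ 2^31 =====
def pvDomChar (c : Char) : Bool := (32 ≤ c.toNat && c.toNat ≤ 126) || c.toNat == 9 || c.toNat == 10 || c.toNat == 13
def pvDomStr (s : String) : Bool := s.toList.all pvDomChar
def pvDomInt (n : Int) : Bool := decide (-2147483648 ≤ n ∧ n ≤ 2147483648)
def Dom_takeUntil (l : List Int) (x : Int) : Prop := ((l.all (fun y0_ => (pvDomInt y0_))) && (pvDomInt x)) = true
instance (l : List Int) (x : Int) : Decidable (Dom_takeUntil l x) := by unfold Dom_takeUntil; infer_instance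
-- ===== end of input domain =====

-- B computes the prefix by one index lookup plus one slice instead of A's element-by-element append loop; objective: simpler.

-- ===== PORT A =====
-- the while loop: state (l, lRes); each iteration appends l[0] and either breaks or drops the head
def takeUntilLoop (l : List Int) (x : Int) (lRes : List Int) : List Int :=
  match l with
  | [] => lRes
  | h :: t =>
    let lRes' := lRes ++ [h]
    if h = x then lRes' else takeUntilLoop t x lRes'

def takeUntil (l : List Int) (x : Int) : List Int :=
  takeUntilLoop l x []

-- ===== PORT B =====
def takeUntil_alt (l : List Int) (x : Int) : List Int :=
  match PySem.List.index? l x with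
  | some i => PySem.List.slice l none (some ((i : Int) + 1))
  | none => l

-- ===== PRECONDITION & SPEC =====
def Spec_takeUntil (l : List Int) (x : Int) (out : List Int) : Prop := out = takeUntil_alt l x
instance (l : List Int) (x : Int) (out : List Int) : Decidable (Spec_takeUntil l x out) := by unfold Spec_takeUntil; infer_instance

-- ===== CLAIM (what is proved, stated in full; the proofs are below) =====
def Claim_equal_takeUntil : Prop := ∀ (l : List Int) (x : Int), Dom_takeUntil l x → Spec_takeUntil l x (takeUntil l x)

-- ===== LEMMAS AND PROOFS =====

theorem alt_nil (x : Int) : takeUntil_alt [] x = [] := by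
  simp [takeUntil_alt, PySem.List.index?]

theorem alt_cons_self (t : List Int) (x : Int) :
    takeUntil_alt (x :: t) x = [x] := by
  simp only [takeUntil_alt, PySem.List.index?_cons_self]
  rw [show (((0 : Nat) : Int) + 1) = ((1 : Nat) : Int) by norm_num, PySem.List.slice_to_natCast]
  simp

theorem alt_cons_ne (h : Int) (t : List Int) (x : Int) (hne : h ≠ x) :
    takeUntil_alt (h :: t) x = h :: takeUntil_alt t x := by
  cases hi : PySem.List.index? t x with
  | none => simp only [takeUntil_alt, PySem.List.index?_cons_of_ne t hne, hi, Option.map_none]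
  | some i =>
    simp only [takeUntil_alt, PySem.List.index?_cons_of_ne t hne, hi, Option.map_some]
    rw [show (((i + 1 : Nat) : Int) + 1) = (((i + 2 : Nat)) : Int) by push_cast; ring,
        show ((i : Int) + 1) = (((i + 1 : Nat)) : Int) by push_cast; ring,
        PySem.List.slice_to_natCast, PySem.List.slice_to_natCast]
    simp [List.take_succ_cons]

theorem loop_eq (l : List Int) (x : Int) (acc : List Int) :
    takeUntilLoop l x acc = acc ++ takeUntil_alt l x := by
  induction l generalizing acc with
  | nil => simp [takeUntilLoop, alt_nil]
  | cons h t ih =>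
    by_cases hx : h = x
    · subst hx
      simp [takeUntilLoop, alt_cons_self]
    · simp only [takeUntilLoop, if_neg hx, ih, alt_cons_ne h t x hx]
      simp

-- ===== VERDICT (by name: the statement is the Claim_ definition above) =====
theorem takeUntil_spec : Claim_equal_takeUntil := by
  intro l x _
  unfold Spec_takeUntil takeUntil
  simp [loop_eq]
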